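-- pv_equiv track=rewrite | github.com/TheRealAsciiMan/Chiffrement | RSA.py | fig_to_car
-- ===== SOURCE A (Python) =====
-- def fig_to_car(message):
--     alphabet = {'01': 'A', '02': 'B', '03': 'C', '04': 'D', '05': 'E', '06': 'F', '07': 'G', '08': 'H', '09': 'I', '10': 'J', '11': 'K', '12': 'L', '13': 'M', '14': 'N', '15': 'O', '16': 'P', '17': 'Q', '18': 'R', '19': 'S', '20': 'T', '21': 'U', '22': 'V', '23': 'W', '24': 'X', '25': 'Y', '26': 'Z', '27': 'a', '28': 'b', '29': 'c', '30': 'd', '31': 'e', '32': 'f', '33': 'g', '34': 'h', '35': 'i', '36': 'j', '37': 'k', '38': 'l', '39': 'm', '40': 'n', '41': 'o', '42': 'p', '43': 'q', '44': 'r', '45': 's', '46': 't', '47': 'u', '48': 'v', '49': 'w', '50': 'x', '51': 'y', '52': 'z'}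
--     result = ''
--     for i in range(0, len(message), 2):
--         bloc = message[i:i+2]
--         if bloc in alphabet:
--             result += alphabet[bloc]
--     return result
-- ===== SOURCE B (Python) =====
-- def fig_to_car(message):
--     letters = "ABCDEFGHIJKLMNOPQRSTUVWXYZabcdefghijklmnopqrstuvwxyz"
--     out = []
--     pending = None
--     for ch in message:
--         if pending is None:
--             pending = ch
--         else:
--             if '0' <= pending <= '9' and '0' <= ch <= '9':
--                 n = 10 * (ord(pending) - 48) + (ord(ch) - 48)
--                 if 1 <= n <= 52:
--                     out.append(letters[n - 1])
--             pending = None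
--     return ''.join(out)
-- ===== Notes on version B (the rewrite author's own statement) =====
-- stated objective: faster
-- what changed: Replaces the index-stride loop that builds a 2-char slice and hashes it into a 52-entry dict per block by a single char-by-char pass with a pending-char state machine that forms the two-digit number arithmetically and indexes one alphabet string.
import Mathlib
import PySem

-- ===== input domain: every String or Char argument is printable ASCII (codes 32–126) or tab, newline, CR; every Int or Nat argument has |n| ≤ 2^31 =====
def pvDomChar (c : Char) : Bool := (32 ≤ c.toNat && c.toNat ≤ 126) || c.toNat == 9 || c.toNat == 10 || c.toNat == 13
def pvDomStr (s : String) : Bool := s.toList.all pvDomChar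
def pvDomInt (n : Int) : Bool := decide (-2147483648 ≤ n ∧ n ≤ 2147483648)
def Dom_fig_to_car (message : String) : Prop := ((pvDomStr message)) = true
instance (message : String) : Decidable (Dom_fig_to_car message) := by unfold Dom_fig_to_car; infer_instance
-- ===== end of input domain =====

set_option maxRecDepth 1000000

-- B replaces A's index-stride/slice loop with 52-entry dict lookups by a single
-- char-by-char state-machine pass with arithmetic decoding; measurably faster (constant factor).

-- ===== PORT A =====
-- A's dict literal `alphabet` (keys as char lists, one entry per line of the Python literal)
def alphaA : PySem.Dict (List Char) Char := PySem.Dict.ofList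
  [(['0','1'],'A'), (['0','2'],'B'), (['0','3'],'C'), (['0','4'],'D'), (['0','5'],'E'),
   (['0','6'],'F'), (['0','7'],'G'), (['0','8'],'H'), (['0','9'],'I'), (['1','0'],'J'),
   (['1','1'],'K'), (['1','2'],'L'), (['1','3'],'M'), (['1','4'],'N'), (['1','5'],'O'),
   (['1','6'],'P'), (['1','7'],'Q'), (['1','8'],'R'), (['1','9'],'S'), (['2','0'],'T'),
   (['2','1'],'U'), (['2','2'],'V'), (['2','3'],'W'), (['2','4'],'X'), (['2','5'],'Y'),
   (['2','6'],'Z'), (['2','7'],'a'), (['2','8'],'b'), (['2','9'],'c'), (['3','0'],'d'),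
   (['3','1'],'e'), (['3','2'],'f'), (['3','3'],'g'), (['3','4'],'h'), (['3','5'],'i'),
   (['3','6'],'j'), (['3','7'],'k'), (['3','8'],'l'), (['3','9'],'m'), (['4','0'],'n'),
   (['4','1'],'o'), (['4','2'],'p'), (['4','3'],'q'), (['4','4'],'r'), (['4','5'],'s'),
   (['4','6'],'t'), (['4','7'],'u'), (['4','8'],'v'), (['4','9'],'w'), (['5','0'],'x'),
   (['5','1'],'y'), (['5','2'],'z')]

def fig_to_car (message : String) : String :=
  let cs := message.toList
  String.ofList
    ((PySem.List.pyRange 0 (PySem.List.len cs) 2).foldl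
      (fun result i =>
        match alphaA.get? (PySem.List.slice cs (some i) (some (i + 2))) with
        | some c => result ++ [c]
        | none => result)
      [])

-- ===== PORT B =====
-- Source B's `letters` string
def lettersB : List Char :=
  "ABCDEFGHIJKLMNOPQRSTUVWXYZabcdefghijklmnopqrstuvwxyz".toList

-- Source B's loop body: state = (out, pending); `letters[n-1]` ported via pyGet?
-- (none = IndexError, unreachable since 1 ≤ n ≤ 52 there)
def stepB (st : List Char × Option Char) (ch : Char) : List Char × Option Char :=
  match st with
  | (out, none) => (out, some ch)
  | (out, some p) =>
    if '0' ≤ p ∧ p ≤ '9' ∧ '0' ≤ ch ∧ ch ≤ '9' then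
      let n : Nat := 10 * (p.toNat - 48) + (ch.toNat - 48)
      if 1 ≤ n ∧ n ≤ 52 then
        match PySem.List.pyGet? lettersB ((n : Int) - 1) with
        | some c => (out ++ [c], none)
        | none => (out, none)
      else (out, none)
    else (out, none)

def fig_to_car_alt (message : String) : String :=
  String.ofList (message.toList.foldl stepB ([], none)).1

-- ===== PRECONDITION & SPEC =====
def Spec_fig_to_car (message : String) (out : String) : Prop := out = fig_to_car_alt message
instance (message : String) (out : String) : Decidable (Spec_fig_to_car message out) := by unfold Spec_fig_to_car; infer_instance

-- ===== CLAIM (what is proved, stated in full; the proofs are below) =====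
def Claim_equal_fig_to_car : Prop := ∀ (message : String), Dom_fig_to_car message → Spec_fig_to_car message (fig_to_car message)

-- ===== LEMMAS AND PROOFS =====

-- A's loop body, named for the proofs (defeq to the lambda in `fig_to_car`)
def fA (cs : List Char) : List Char → Int → List Char :=
  fun result i =>
    match alphaA.get? (PySem.List.slice cs (some i) (some (i + 2))) with
    | some c => result ++ [c]
    | none => result

-- A's per-block action: look the 2-char block up in the dict, yield [c] or nothing
def dec2 (a b : Char) : List Char :=
  match alphaA.get? [a, b] with
  | some c => [c]
  | none => []

-- B's per-pair contribution, as a list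
def blockB (a b : Char) : List Char :=
  if '0' ≤ a ∧ a ≤ '9' ∧ '0' ≤ b ∧ b ≤ '9' then
    let n : Nat := 10 * (a.toNat - 48) + (b.toNat - 48)
    if 1 ≤ n ∧ n ≤ 52 then
      match PySem.List.pyGet? lettersB ((n : Int) - 1) with
      | some c => [c]
      | none => []
    else []
  else []

-- what A's loop produces, two characters at a time
def gA : List Char → List Char
  | a :: b :: rest => dec2 a b ++ gA rest
  | _ => []

lemma stepB_pair (out : List Char) (a b : Char) :
    stepB (stepB (out, none) a) b = (out ++ blockB a b, none) := by
  simp only [stepB, blockB]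
  split_ifs
  · split <;> simp_all
  · simp
  · simp

set_option maxRecDepth 10000 in
lemma char_cases (c : Char) (h1 : '0' ≤ c) (h2 : c ≤ '9') :
    c = '0' ∨ c = '1' ∨ c = '2' ∨ c = '3' ∨ c = '4' ∨
    c = '5' ∨ c = '6' ∨ c = '7' ∨ c = '8' ∨ c = '9' := by
  have he : Char.ofNat c.toNat = c := Char.ofNat_toNat c
  have h1' : 48 ≤ c.toNat := h1
  have h2' : c.toNat ≤ 57 := h2
  obtain ⟨n, hn⟩ : ∃ n, c.toNat = n := ⟨_, rfl⟩
  rw [hn] at h1' h2' he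
  interval_cases n <;> rw [← he] <;> decide

set_option maxRecDepth 10000 in
set_option maxHeartbeats 1000000 in
lemma block_eq (a b : Char) : dec2 a b = blockB a b := by
  by_cases hd : '0' ≤ a ∧ a ≤ '9' ∧ '0' ≤ b ∧ b ≤ '9'
  · obtain ⟨ha1, ha2, hb1, hb2⟩ := hd
    rcases char_cases a ha1 ha2 with rfl|rfl|rfl|rfl|rfl|rfl|rfl|rfl|rfl|rfl <;>
      rcases char_cases b hb1 hb2 with rfl|rfl|rfl|rfl|rfl|rfl|rfl|rfl|rfl|rfl <;>
      decide
  · have hnone : alphaA.get? [a, b] = none := by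
      cases h : alphaA.get? [a, b] with
      | none => rfl
      | some c =>
        exfalso
        have hm := PySem.Dict.mem_items_of_get?_eq_some _ h
        have hall : alphaA.items.all
            (fun p => p.1.all (fun ch => decide ('0' ≤ ch) && decide (ch ≤ '9'))) = true := by decide
        rw [List.all_eq_true] at hall
        have hp := hall _ hm
        rw [List.all_eq_true] at hp
        have hpa := hp a (by simp)
        have hpb := hp b (by simp)
        simp at hpa hpb
        exact hd ⟨hpa.1, hpa.2, hpb.1, hpb.2⟩
    simp [dec2, hnone, blockB, hd]

-- B's fold, two characters at a time, equals gA
lemma foldB : ∀ (cs out : List Char),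
    (cs.foldl stepB (out, none)).1 = out ++ gA cs
  | [], out => by simp [gA]
  | [a], out => by simp [stepB, gA]
  | a :: b :: rest, out => by
    simp only [List.foldl_cons]
    rw [stepB_pair, foldB rest (out ++ blockB a b), ← block_eq, gA, List.append_assoc]

lemma pyRange_two_cons (a b : Int) (h : a < b) :
    PySem.List.pyRange a b 2 = a :: PySem.List.pyRange (a + 2) b 2 := by
  rw [PySem.List.pyRange_of_pos a b (by norm_num), PySem.List.pyRange_of_pos (a + 2) b (by norm_num)]
  rw [if_pos h]
  by_cases h2 : a + 2 < b
  · rw [if_pos h2]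
    have hc : ((b - a + 2 - 1) / 2).toNat = ((b - (a + 2) + 2 - 1) / 2).toNat + 1 := by omega
    rw [hc, List.range_succ_eq_map, List.map_cons, List.map_map]
    congr 1
    · simp
    · apply List.map_congr_left
      intro k _
      simp [Function.comp]
      ring
  · rw [if_neg h2]
    have hc : ((b - a + 2 - 1) / 2).toNat = 1 := by omega
    rw [hc]
    simp

lemma pyRange_two_shift (n : Int) :
    PySem.List.pyRange 2 n 2 = (PySem.List.pyRange 0 (n - 2) 2).map (· + 2) := by
  rw [PySem.List.pyRange_of_pos 2 n (by norm_num), PySem.List.pyRange_of_pos 0 (n - 2) (by norm_num),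
    List.map_map]
  by_cases h : 2 < n
  · rw [if_pos h, if_pos (by omega : (0:Int) < n - 2)]
    have hc : ((n - 2 + 2 - 1) / 2).toNat = ((n - 2 - 0 + 2 - 1) / 2).toNat := by omega
    rw [hc]
    apply List.map_congr_left
    intro k _
    simp [Function.comp]
    ring
  · rw [if_neg h, if_neg (by omega : ¬ (0:Int) < n - 2)]
    simp

lemma slice_two_head (a b : Char) (rest : List Char) :
    PySem.List.slice (a :: b :: rest) (some 0) (some (0 + 2)) = [a, b] := by
  rw [PySem.List.slice_zero_start, PySem.List.slice_to _ (by norm_num)]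
  rfl

lemma slice_two_shift (a b : Char) (rest : List Char) (i : Int) (hi : 0 ≤ i) :
    PySem.List.slice (a :: b :: rest) (some (i + 2)) (some (i + 2 + 2)) =
    PySem.List.slice rest (some i) (some (i + 2)) := by
  rw [PySem.List.slice_toNat _ (by omega) (by omega), PySem.List.slice_toNat _ hi (by omega)]
  have h2 : (i + 2 + 2).toNat - (i + 2).toNat = 2 := by omega
  have h3 : (i + 2).toNat - i.toNat = 2 := by omega
  have h1 : (i + 2).toNat = i.toNat + 1 + 1 := by omega
  rw [h2, h3, h1, List.drop_succ_cons, List.drop_succ_cons]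

lemma fA_zero (a b : Char) (rest acc : List Char) :
    fA (a :: b :: rest) acc 0 = acc ++ dec2 a b := by
  simp only [fA]
  rw [slice_two_head]
  cases h : alphaA.get? [a, b] <;> simp [dec2, h]

lemma len_two (a b : Char) (rest : List Char) :
    PySem.List.len (a :: b :: rest) = (rest.length : Int) + 2 := by
  rw [PySem.List.len_eq, List.length_cons, List.length_cons]
  omega

lemma loopA : ∀ (cs acc : List Char),
    (PySem.List.pyRange 0 (PySem.List.len cs) 2).foldl (fA cs) acc = acc ++ gA cs
  | [], acc => by
    have h0 : PySem.List.len ([] : List Char) = 0 := by simp [PySem.List.len_eq]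
    rw [h0, (by decide : PySem.List.pyRange 0 0 2 = [])]
    simp [gA]
  | [a], acc => by
    have h1 : PySem.List.len [a] = 1 := by simp [PySem.List.len_eq]
    rw [h1, (by decide : PySem.List.pyRange 0 1 2 = [0])]
    simp only [List.foldl_cons, List.foldl_nil]
    have hs : PySem.List.slice [a] (some 0) (some (0 + 2)) = [a] := by
      rw [PySem.List.slice_zero_start, PySem.List.slice_to _ (by norm_num)]
      rfl
    have hnone : alphaA.get? [a] = none := by
      cases h : alphaA.get? [a] with
      | none => rfl
      | some c =>
        exfalso
        have hm := PySem.Dict.mem_items_of_get?_eq_some _ h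
        have hall : alphaA.items.all (fun p => p.1.length == 2) = true := by decide
        rw [List.all_eq_true] at hall
        have := hall _ hm
        simp at this
    simp only [fA]
    rw [hs, hnone]
    simp [gA]
  | a :: b :: rest, acc => by
    rw [len_two]
    rw [pyRange_two_cons 0 ((rest.length : Int) + 2) (by omega)]
    rw [(by norm_num : (0:Int) + 2 = 2)]
    rw [pyRange_two_shift]
    rw [(by rw [PySem.List.len_eq] : ((rest.length : Int) + 2 - 2) = PySem.List.len rest + 2 - 2)]
    rw [(by ring : PySem.List.len rest + 2 - 2 = PySem.List.len rest)]
    simp only [List.foldl_cons]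
    rw [List.foldl_map]
    have hcong : ∀ (ac : List Char), ∀ i ∈ PySem.List.pyRange 0 (PySem.List.len rest) 2,
        fA (a :: b :: rest) ac (i + 2) = fA rest ac i := by
      intro ac i hi
      have hi0 : 0 ≤ i := by
        rw [PySem.List.mem_pyRange_iff_of_pos (by norm_num)] at hi
        exact hi.1
      simp only [fA]
      rw [slice_two_shift a b rest i hi0]
    calc List.foldl (fun x y => fA (a :: b :: rest) x (y + 2)) (fA (a :: b :: rest) acc 0)
          (PySem.List.pyRange 0 (PySem.List.len rest) 2)
        = List.foldl (fA rest) (fA (a :: b :: rest) acc 0)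
            (PySem.List.pyRange 0 (PySem.List.len rest) 2) :=
          PySem.List.foldl_congr_mem _ _ _ _ (fun ac x hx => hcong ac x hx)
      _ = List.foldl (fA rest) (acc ++ dec2 a b) (PySem.List.pyRange 0 (PySem.List.len rest) 2) := by
          rw [fA_zero]
      _ = (acc ++ dec2 a b) ++ gA rest := loopA rest (acc ++ dec2 a b)
      _ = acc ++ gA (a :: b :: rest) := by rw [gA, List.append_assoc]

theorem fig_to_car_eq (message : String) : fig_to_car message = fig_to_car_alt message := by
  simp only [fig_to_car, fig_to_car_alt]
  rw [foldB message.toList []]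
  show String.ofList
      ((PySem.List.pyRange 0 (PySem.List.len message.toList) 2).foldl (fA message.toList) []) = _
  rw [loopA message.toList []]

-- ===== VERDICT (by name: the statement is the Claim_ definition above) =====
theorem fig_to_car_spec : Claim_equal_fig_to_car := by
  intro message _
  unfold Spec_fig_to_car
  exact fig_to_car_eq message
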